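-- pv_equiv track=rewrite | github.com/Fukulyn/FinalProjectCode | ESP-32/mqtt_heartbeat.py | calculate_heart_rate
-- ===== SOURCE A (Python) =====
-- def moving_average(data, window_size=5):
--     if len(data) < window_size:
--         return data
--     smoothed = []
--     for i in range(len(data) - window_size + 1):
--         window = data[i:i + window_size]
--         smoothed.append(sum(window) / window_size)
--     return smoothed
--
-- def calculate_heart_rate(ir_samples, time_elapsed):
--     if len(ir_samples) < 100 or time_elapsed <= 0:
--         return 0
--
--     # 平滑數據
--     smoothed = moving_average(ir_samples, window_size=5)
--
--     # 檢測峰值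
--     peaks = []
--     threshold = (max(smoothed) + min(smoothed)) / 2
--     min_peak_distance = int(len(smoothed) / 10)
--     last_peak = -min_peak_distance - 1
--
--     for i in range(1, len(smoothed) - 1):
--         if (smoothed[i] > threshold and
--             smoothed[i] > smoothed[i-1] and
--             smoothed[i] > smoothed[i+1] and
--             i - last_peak > min_peak_distance):
--             peaks.append(i)
--             last_peak = i
--
--     if len(peaks) < 2:
--         return 0
--
--     intervals = [peaks[i+1] - peaks[i] for i in range(len(peaks)-1)]
--     avg_interval = sum(intervals) / len(intervals)
--     sample_rate = len(ir_samples) / time_elapsed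
--     heart_rate = (60 * sample_rate) / avg_interval
--     return int(heart_rate)
-- ===== SOURCE B (Python) =====
-- def calculate_heart_rate(ir_samples, time_elapsed):
--     if len(ir_samples) < 100 or time_elapsed <= 0:
--         return 0
--     n = len(ir_samples)
--     # prefix-sum array: smoothed value i is (prefix[i+5]-prefix[i])/5,
--     # an exact integer window sum divided once
--     prefix = [0]
--     for x in ir_samples:
--         prefix.append(prefix[-1] + x)
--     m = n - 4
--     smoothed = [(prefix[i + 5] - prefix[i]) / 5 for i in range(m)]
--     threshold = (max(smoothed) + min(smoothed)) / 2
--     min_peak_distance = int(m / 10)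
--     # stage 1: all interior strict local maxima above the threshold
--     candidates = [i for i in range(1, m - 1)
--                   if smoothed[i] > threshold
--                   and smoothed[i] > smoothed[i - 1]
--                   and smoothed[i] > smoothed[i + 1]]
--     # stage 2: greedy minimum-distance selection over the candidates,
--     # keeping only the first/last selected index and the count
--     first = last_sel = count = 0
--     last = -min_peak_distance - 1
--     for i in candidates:
--         if i - last > min_peak_distance:
--             if count == 0:
--                 first = i
--             last_sel = i
--             count += 1
--             last = i
--     if count < 2:
--         return 0
--     # telescoping: the consecutive peak gaps sum to last_sel - first
--     avg_interval = (last_sel - first) / (count - 1)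
--     return int((60 * (n / time_elapsed)) / avg_interval)
-- ===== Notes on version B (the rewrite author's own statement) =====
-- stated objective: alternative
-- what changed: B smooths via a prefix-sum array (each smoothed value is a difference of two prefix sums instead of a re-summed slice), splits peak detection into two staged passes - a threshold/local-maximum filter producing a candidate list, then a greedy minimum-distance selection over that list keeping only the first/last index and a count - and replaces the intervals list by the telescoping identity (last-first)/(count-1).
import Mathlib
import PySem

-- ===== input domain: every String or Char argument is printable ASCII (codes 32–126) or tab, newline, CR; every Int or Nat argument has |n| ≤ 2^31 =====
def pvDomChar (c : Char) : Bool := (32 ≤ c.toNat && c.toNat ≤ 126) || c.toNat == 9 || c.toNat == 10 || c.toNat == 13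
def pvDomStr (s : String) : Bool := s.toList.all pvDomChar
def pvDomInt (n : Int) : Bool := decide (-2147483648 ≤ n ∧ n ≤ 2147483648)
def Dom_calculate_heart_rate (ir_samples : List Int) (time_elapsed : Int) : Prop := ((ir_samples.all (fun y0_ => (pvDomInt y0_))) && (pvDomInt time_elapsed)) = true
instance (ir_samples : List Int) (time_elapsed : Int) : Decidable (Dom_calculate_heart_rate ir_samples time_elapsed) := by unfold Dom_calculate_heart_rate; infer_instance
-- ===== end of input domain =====

-- B replaces A's slice-and-sum smoothing by a prefix-sum array, splits A's single stateful
-- peak loop into two staged passes (a threshold/local-max filter producing a candidate list,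
-- then a greedy minimum-distance selection keeping only first/last/count), and replaces the
-- intervals list by the telescoping identity (last-first)/(count-1); same return value (the
-- Lean ports model Python's float arithmetic exactly via pvRound, round-to-nearest-even
-- binary64 on rationals).

-- ---- shared float semantics (Python binary64 arithmetic, used identically by both ports) ----
-- pvRound q = the IEEE-754 binary64 nearest-even rounding of the rational q (exact for the
-- normal, non-overflowing magnitudes these programs produce); pvTrunc = Python int(float).
def pvRound (q : ℚ) : ℚ :=
  if q = 0 then 0
  else
    let x := |q|
    let e0 : ℤ := (Nat.log2 q.num.natAbs : ℤ) - (Nat.log2 x.den : ℤ)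
    let e : ℤ := if x < (2 : ℚ) ^ e0 then e0 - 1 else e0
    let y : ℚ := x * (2 : ℚ) ^ (52 - e)
    let n0 : ℤ := ⌊y⌋
    let r : ℚ := y - (n0 : ℚ)
    let m : ℤ :=
      if r < 1 / 2 then n0
      else if 1 / 2 < r then n0 + 1
      else if n0 % 2 = 0 then n0 else n0 + 1
    (if q < 0 then -1 else 1) * (m : ℚ) * (2 : ℚ) ^ (e - 52)

def pvTrunc (q : ℚ) : ℤ := q.num.tdiv q.den

-- ===== PORT A =====
def moving_average (data : List ℚ) (window_size : ℤ) : List ℚ :=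
  if PySem.List.len data < window_size then data
  else
    (PySem.List.pyRange 0 (PySem.List.len data - window_size + 1) 1).foldl
      (fun smoothed i =>
        smoothed ++ [pvRound ((PySem.List.slice data (some i) (some (i + window_size))).sum /
                              (window_size : ℚ))])
      []

def calculate_heart_rate (ir_samples : List Int) (time_elapsed : Int) : Int :=
  if PySem.List.len ir_samples < 100 ∨ time_elapsed ≤ 0 then 0
  else
    let smoothed := moving_average (ir_samples.map (fun (z : ℤ) => (z : ℚ))) 5
    let threshold :=
      pvRound (pvRound ((PySem.List.max? smoothed (fun x => x)).getD 0 +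
                        (PySem.List.min? smoothed (fun x => x)).getD 0) / 2)
    let min_peak_distance := pvTrunc (pvRound ((PySem.List.len smoothed : ℚ) / 10))
    let st :=
      (PySem.List.pyRange 1 (PySem.List.len smoothed - 1) 1).foldl
        (fun (st : List ℤ × ℤ) i =>
          if PySem.List.pyGetD smoothed i 0 > threshold ∧
             PySem.List.pyGetD smoothed i 0 > PySem.List.pyGetD smoothed (i - 1) 0 ∧
             PySem.List.pyGetD smoothed i 0 > PySem.List.pyGetD smoothed (i + 1) 0 ∧
             i - st.2 > min_peak_distance
          then (st.1 ++ [i], i)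
          else st)
        ([], -min_peak_distance - 1)
    let peaks := st.1
    if PySem.List.len peaks < 2 then 0
    else
      let intervals :=
        (PySem.List.pyRange 0 (PySem.List.len peaks - 1) 1).map
          (fun i => PySem.List.pyGetD peaks (i + 1) 0 - PySem.List.pyGetD peaks i 0)
      let avg_interval := pvRound ((intervals.sum : ℚ) / (PySem.List.len intervals : ℚ))
      let sample_rate := pvRound ((PySem.List.len ir_samples : ℚ) / (time_elapsed : ℚ))
      pvTrunc (pvRound (pvRound (60 * sample_rate) / avg_interval))

-- ===== PORT B =====
def calculate_heart_rate_alt (ir_samples : List Int) (time_elapsed : Int) : Int :=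
  if PySem.List.len ir_samples < 100 ∨ time_elapsed ≤ 0 then 0
  else
    let n := PySem.List.len ir_samples
    -- prefix = [0]; for x in ir_samples: prefix.append(prefix[-1] + x)
    let pre := ir_samples.foldl
      (fun (pl : List ℤ) x => pl ++ [PySem.List.pyGetD pl (-1) 0 + x]) [0]
    let m := n - 4
    let smoothed := (PySem.List.pyRange 0 m 1).map
      (fun i => pvRound (((PySem.List.pyGetD pre (i + 5) 0 - PySem.List.pyGetD pre i 0 : ℤ) : ℚ) / 5))
    let threshold :=
      pvRound (pvRound ((PySem.List.max? smoothed (fun x => x)).getD 0 +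
                        (PySem.List.min? smoothed (fun x => x)).getD 0) / 2)
    let min_peak_distance := pvTrunc (pvRound ((m : ℚ) / 10))
    -- stage 1: candidate list of interior strict local maxima above the threshold
    let candidates := (PySem.List.pyRange 1 (m - 1) 1).filter
      (fun i => decide (PySem.List.pyGetD smoothed i 0 > threshold ∧
                        PySem.List.pyGetD smoothed i 0 > PySem.List.pyGetD smoothed (i - 1) 0 ∧
                        PySem.List.pyGetD smoothed i 0 > PySem.List.pyGetD smoothed (i + 1) 0))
    -- stage 2: greedy minimum-distance selection keeping (first, last_sel, count, last)
    let st := candidates.foldl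
      (fun (st : ℤ × ℤ × ℤ × ℤ) i =>
        if i - st.2.2.2 > min_peak_distance
        then ((if st.2.2.1 = 0 then i else st.1), i, st.2.2.1 + 1, i)
        else st)
      (0, 0, 0, -min_peak_distance - 1)
    if st.2.2.1 < 2 then 0
    else
      let avg_interval := pvRound (((st.2.1 - st.1 : ℤ) : ℚ) / ((st.2.2.1 - 1 : ℤ) : ℚ))
      let sample_rate := pvRound ((n : ℚ) / (time_elapsed : ℚ))
      pvTrunc (pvRound (pvRound (60 * sample_rate) / avg_interval))

-- ===== PRECONDITION & SPEC =====
def Spec_calculate_heart_rate (ir_samples : List Int) (time_elapsed : Int) (out : Int) : Prop := out = calculate_heart_rate_alt ir_samples time_elapsed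
instance (ir_samples : List Int) (time_elapsed : Int) (out : Int) : Decidable (Spec_calculate_heart_rate ir_samples time_elapsed out) := by unfold Spec_calculate_heart_rate; infer_instance

-- ===== CLAIM (what is proved, stated in full; the proofs are below) =====
def Claim_equal_calculate_heart_rate : Prop := ∀ (ir_samples : List Int) (time_elapsed : Int), Dom_calculate_heart_rate ir_samples time_elapsed → Spec_calculate_heart_rate ir_samples time_elapsed (calculate_heart_rate ir_samples time_elapsed)

-- ===== LEMMAS AND PROOFS =====

-- ghost: the list of window sums (window 5) of a list of ints
def wsums : List ℤ → List ℤ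
  | a :: b :: c :: d :: e :: rest => (a + b + c + d + e) :: wsums (b :: c :: d :: e :: rest)
  | _ => []

theorem wsums_window : ∀ (data : List ℤ),
    (List.range (data.length - 4)).map (fun k => ((data.drop k).take 5).sum) = wsums data := by
  intro data
  fun_induction wsums data with
  | case1 a b c d e rest ih =>
      have hlen : (a :: b :: c :: d :: e :: rest).length - 4 = rest.length + 1 := by
        simp
      have h2 : (b :: c :: d :: e :: rest).length - 4 = rest.length := by simp
      rw [hlen, List.range_succ_eq_map, List.map_cons, List.map_map]
      refine congrArg₂ List.cons ?_ ?_
      · simp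
        ring
      · rw [← ih, h2]
        exact List.map_congr_left (fun k _ => by simp)
  | case2 x hx =>
      rcases x with _ | ⟨a, _ | ⟨b, _ | ⟨c, _ | ⟨d, _ | ⟨e, tl⟩⟩⟩⟩⟩
      · rfl
      · rfl
      · rfl
      · rfl
      · rfl
      · exact absurd rfl (hx a b c d e tl)

theorem wsums_length : ∀ (data : List ℤ), (wsums data).length = data.length - 4 := by
  intro data
  fun_induction wsums data with
  | case1 a b c d e rest ih => simp [ih]
  | case2 x hx =>
      rcases x with _ | ⟨a, _ | ⟨b, _ | ⟨c, _ | ⟨d, _ | ⟨e, tl⟩⟩⟩⟩⟩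
      · rfl
      · rfl
      · rfl
      · rfl
      · rfl
      · exact absurd rfl (hx a b c d e tl)

theorem slice_window (data : List ℤ) (k : ℕ) :
    PySem.List.slice (data.map (fun (z : ℤ) => (z : ℚ))) (some (k : ℤ)) (some ((k : ℤ) + 5)) =
      ((data.drop k).take 5).map (fun (z : ℤ) => (z : ℚ)) := by
  have h5 : ((k : ℤ) + 5) = ((k : ℤ) + ((5 : ℕ) : ℤ)) := by norm_num
  rw [h5, PySem.List.slice_natCast_add]
  simp [List.map_take, List.map_drop]

theorem movingAverage_eq_wsums (data : List ℤ) (h : 5 ≤ data.length) :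
    moving_average (data.map (fun (z : ℤ) => (z : ℚ))) 5 =
      (wsums data).map (fun (S : ℤ) => pvRound ((S : ℚ) / 5)) := by
  unfold moving_average
  rw [if_neg (by simp [PySem.List.len_eq]; omega)]
  rw [PySem.List.foldl_append_singleton_eq_map]
  have hb : (PySem.List.len (data.map (fun (z : ℤ) => (z : ℚ))) - 5 + 1) =
      ((data.length - 4 : ℕ) : ℤ) := by
    simp [PySem.List.len_eq]
    omega
  rw [hb, PySem.List.pyRange_zero_natCast, List.map_map, ← wsums_window data, List.map_map,
      List.nil_append]
  refine List.map_congr_left ?_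
  intro k hk
  simp only [Function.comp_apply]
  rw [slice_window]
  congr 1
  push_cast
  ring

-- ghost: partial sums of xs starting after s (the tail of B's prefix array)
def psums : List ℤ → ℤ → List ℤ
  | [], _ => []
  | x :: xs, s => (s + x) :: psums xs (s + x)

theorem foldl_prefix : ∀ (xs acc : List ℤ) (s : ℤ), acc ≠ [] →
    PySem.List.pyGetD acc (-1) (0 : ℤ) = s →
    xs.foldl (fun (pl : List ℤ) x => pl ++ [PySem.List.pyGetD pl (-1) 0 + x]) acc =
      acc ++ psums xs s := by
  intro xs
  induction xs with
  | nil => intro acc s _ _; simp [psums]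
  | cons x xs ih =>
      intro acc s hne hs
      rw [List.foldl_cons, hs,
          ih (acc ++ [s + x]) (s + x) (by simp) (PySem.List.pyGetD_neg_one_append_singleton _ _ _)]
      simp [psums]

theorem psums_getD : ∀ (xs : List ℤ) (s : ℤ) (k : ℕ), k < xs.length →
    (psums xs s).getD k 0 = s + (xs.take (k + 1)).sum := by
  intro xs
  induction xs with
  | nil => intro s k hk; simp at hk
  | cons x xs ih =>
      intro s k hk
      cases k with
      | zero => simp [psums]
      | succ k =>
          have := ih (s + x) k (by simpa using hk)
          simp only [psums, List.getD_cons_succ, this, List.take_succ_cons, List.sum_cons]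
          ring

theorem prefix_getD (ir : List ℤ) (j : ℕ) (hj : j ≤ ir.length) :
    ((0 : ℤ) :: psums ir 0).getD j 0 = (ir.take j).sum := by
  cases j with
  | zero => simp
  | succ j =>
      rw [List.getD_cons_succ, psums_getD ir 0 j (by omega)]
      simp

theorem take_sub_window (ir : List ℤ) (k : ℕ) :
    (ir.take (k + 5)).sum - (ir.take k).sum = ((ir.drop k).take 5).sum := by
  rw [List.take_add, List.sum_append]
  ring

theorem prefixSmoothing_eq_wsums (ir : List ℤ) (h : 5 ≤ ir.length) :
    (PySem.List.pyRange 0 (PySem.List.len ir - 4) 1).map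
      (fun i => pvRound
        (((PySem.List.pyGetD
             (ir.foldl (fun (pl : List ℤ) x => pl ++ [PySem.List.pyGetD pl (-1) 0 + x]) [0])
             (i + 5) 0 -
           PySem.List.pyGetD
             (ir.foldl (fun (pl : List ℤ) x => pl ++ [PySem.List.pyGetD pl (-1) 0 + x]) [0])
             i 0 : ℤ) : ℚ) / 5)) =
      (wsums ir).map (fun (S : ℤ) => pvRound ((S : ℚ) / 5)) := by
  have hpre : ir.foldl (fun (pl : List ℤ) x => pl ++ [PySem.List.pyGetD pl (-1) 0 + x]) [0] =
      (0 : ℤ) :: psums ir 0 :=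
    foldl_prefix ir [0] 0 (by simp) (by decide)
  have hb : PySem.List.len ir - 4 = ((ir.length - 4 : ℕ) : ℤ) := by
    simp [PySem.List.len_eq]; omega
  rw [hpre, hb, PySem.List.pyRange_zero_natCast, List.map_map, ← wsums_window ir, List.map_map]
  refine List.map_congr_left ?_
  intro k hk
  have hk4 : k < ir.length - 4 := List.mem_range.mp hk
  simp only [Function.comp_apply]
  have h5 : ((k : ℤ) + 5) = ((k + 5 : ℕ) : ℤ) := by push_cast; ring
  rw [h5, PySem.List.pyGetD_natCast, PySem.List.pyGetD_natCast,
      prefix_getD ir (k + 5) (by omega), prefix_getD ir k (by omega), take_sub_window]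

-- staged filter + greedy selection vs A's single stateful loop
theorem filter_greedy (p : ℤ → Bool) (mpd : ℤ) :
    ∀ (l : List ℤ) (pk : List ℤ) (la fi ls co : ℤ),
      co = (pk.length : ℤ) →
      (pk ≠ [] → fi = pk.headD 0 ∧ ls = pk.getLastD 0) →
      let A := l.foldl (fun (st : List ℤ × ℤ) i =>
          if p i = true ∧ i - st.2 > mpd then (st.1 ++ [i], i) else st) (pk, la)
      let B := (l.filter p).foldl (fun (st : ℤ × ℤ × ℤ × ℤ) i =>
          if i - st.2.2.2 > mpd
          then ((if st.2.2.1 = 0 then i else st.1), i, st.2.2.1 + 1, i)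
          else st) (fi, ls, co, la)
      B.2.2.1 = (A.1.length : ℤ) ∧
        (A.1 ≠ [] → B.1 = A.1.headD 0 ∧ B.2.1 = A.1.getLastD 0) := by
  intro l
  induction l with
  | nil =>
      intro pk la fi ls co hco hhl
      exact ⟨hco, hhl⟩
  | cons x xs ih =>
      intro pk la fi ls co hco hhl
      by_cases hp : p x = true
      · rw [List.filter_cons_of_pos hp]
        simp only [List.foldl_cons]
        by_cases hsp : x - la > mpd
        · rw [if_pos hsp, if_pos (show p x = true ∧ x - la > mpd from ⟨hp, hsp⟩)]
          refine ih (pk ++ [x]) x _ _ _ (by simp [hco]) ?_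
          intro _
          constructor
          · by_cases hpk : pk = []
            · subst hpk
              simp at hco
              simp [hco]
            · rw [if_neg (by simpa [hco, List.length_eq_zero_iff] using hpk)]
              rw [(hhl hpk).1]
              cases pk with
              | nil => exact absurd rfl hpk
              | cons y tl => simp
          · simp
        · rw [if_neg hsp, if_neg (show ¬(p x = true ∧ x - la > mpd) from fun hc => hsp hc.2)]
          exact ih pk la fi ls co hco hhl
      · rw [List.filter_cons_of_neg (by simpa using hp)]
        simp only [List.foldl_cons]
        rw [if_neg (show ¬(p x = true ∧ x - la > mpd) from fun hc => hp hc.1)]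
        exact ih pk la fi ls co hco hhl

-- telescoping sum of consecutive differences
theorem tele : ∀ (p : List ℤ) (x : ℤ),
    ((List.range p.length).map
      (fun k => (x :: p).getD (k + 1) 0 - (x :: p).getD k 0)).sum = p.getLastD x - x := by
  intro p
  induction p with
  | nil => intro x; simp
  | cons y t ih =>
      intro x
      simp only [List.length_cons]
      rw [List.range_succ_eq_map, List.map_cons, List.map_map, List.sum_cons]
      have htail : ((List.range t.length).map
          ((fun k => (x :: y :: t).getD (k + 1) 0 - (x :: y :: t).getD k 0) ∘ Nat.succ)).sum =
          t.getLastD y - y := by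
        rw [← ih y]
        congr 1
      rw [htail]
      show (x :: y :: t).getD (0 + 1) 0 - (x :: y :: t).getD 0 0 + (t.getLastD y - y) =
        (y :: t).getLastD x - x
      have hh1 : (x :: y :: t).getD (0 + 1) 0 = y := rfl
      have hh0 : (x :: y :: t).getD 0 0 = x := rfl
      rw [hh1, hh0, List.getLastD_cons]
      ring

theorem intervals_telescope (peaks : List ℤ) (h : peaks ≠ []) :
    (((PySem.List.pyRange 0 (PySem.List.len peaks - 1) 1).map
        (fun i => PySem.List.pyGetD peaks (i + 1) 0 - PySem.List.pyGetD peaks i 0)).sum =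
      peaks.getLastD 0 - peaks.headD 0) ∧
    (((PySem.List.pyRange 0 (PySem.List.len peaks - 1) 1).map
        (fun i => PySem.List.pyGetD peaks (i + 1) 0 - PySem.List.pyGetD peaks i 0)).length =
      peaks.length - 1) := by
  cases peaks with
  | nil => exact absurd rfl h
  | cons x p =>
      have hb : PySem.List.len (x :: p) - 1 = ((p.length : ℕ) : ℤ) := by
        simp [PySem.List.len_eq]
      rw [hb, PySem.List.pyRange_zero_natCast, List.map_map]
      constructor
      · rw [List.getLastD_cons, show (x :: p).headD 0 = x from rfl, ← tele p x]
        refine congrArg _ (List.map_congr_left ?_)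
        intro k hk
        simp only [Function.comp_apply]
        have h1 : ((k : ℤ) + 1) = ((k + 1 : ℕ) : ℤ) := by push_cast; ring
        rw [h1, PySem.List.pyGetD_natCast, PySem.List.pyGetD_natCast]
      · simp

-- ===== VERDICT (by name: the statement is the Claim_ definition above) =====
theorem calculate_heart_rate_spec : Claim_equal_calculate_heart_rate := by
  unfold Claim_equal_calculate_heart_rate
  intro ir t _
  unfold Spec_calculate_heart_rate calculate_heart_rate calculate_heart_rate_alt
  by_cases hg : PySem.List.len ir < 100 ∨ t ≤ 0
  · rw [if_pos hg, if_pos hg]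
  · rw [if_neg hg, if_neg hg]
    have hlen : 100 ≤ ir.length := by
      simp only [PySem.List.len_eq] at hg
      omega
    simp only []
    rw [movingAverage_eq_wsums ir (by omega), prefixSmoothing_eq_wsums ir (by omega)]
    set S : List ℚ := (wsums ir).map (fun (S : ℤ) => pvRound ((S : ℚ) / 5)) with hS
    have hSlen : S.length = ir.length - 4 := by
      rw [hS, List.length_map, wsums_length]
    have hm : PySem.List.len ir - 4 = PySem.List.len S := by
      simp only [PySem.List.len_eq, hSlen]
      omega
    rw [hm]
    set thr : ℚ := pvRound (pvRound ((PySem.List.max? S (fun x => x)).getD 0 +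
        (PySem.List.min? S (fun x => x)).getD 0) / 2) with hthr
    set mpd : ℤ := pvTrunc (pvRound ((PySem.List.len S : ℚ) / 10)) with hmpd
    set p : ℤ → Bool := fun i =>
      decide (PySem.List.pyGetD S i 0 > thr ∧
              PySem.List.pyGetD S i 0 > PySem.List.pyGetD S (i - 1) 0 ∧
              PySem.List.pyGetD S i 0 > PySem.List.pyGetD S (i + 1) 0) with hp
    have hbody : (fun (st : List ℤ × ℤ) i =>
        if PySem.List.pyGetD S i 0 > thr ∧
           PySem.List.pyGetD S i 0 > PySem.List.pyGetD S (i - 1) 0 ∧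
           PySem.List.pyGetD S i 0 > PySem.List.pyGetD S (i + 1) 0 ∧
           i - st.2 > mpd
        then (st.1 ++ [i], i)
        else st) = (fun (st : List ℤ × ℤ) i =>
        if p i = true ∧ i - st.2 > mpd then (st.1 ++ [i], i) else st) := by
      funext st i
      refine if_congr ?_ rfl rfl
      rw [hp]
      simp only [decide_eq_true_eq]
      tauto
    rw [hbody]
    obtain ⟨hcount, hfl⟩ :=
      filter_greedy p mpd (PySem.List.pyRange 1 (PySem.List.len S - 1) 1) [] (-mpd - 1) 0 0 0
        (by simp) (fun h => absurd rfl h)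
    set A := (PySem.List.pyRange 1 (PySem.List.len S - 1) 1).foldl
      (fun (st : List ℤ × ℤ) i =>
        if p i = true ∧ i - st.2 > mpd then (st.1 ++ [i], i) else st) ([], -mpd - 1) with hA
    set B := ((PySem.List.pyRange 1 (PySem.List.len S - 1) 1).filter p).foldl
      (fun (st : ℤ × ℤ × ℤ × ℤ) i =>
        if i - st.2.2.2 > mpd
        then ((if st.2.2.1 = 0 then i else st.1), i, st.2.2.1 + 1, i)
        else st) (0, 0, 0, -mpd - 1) with hB
    rw [PySem.List.len_eq A.1, hcount]
    by_cases hlt : (A.1.length : ℤ) < 2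
    · rw [if_pos hlt, if_pos hlt]
    · rw [if_neg hlt, if_neg hlt]
      have hne : A.1 ≠ [] := by
        intro h0
        rw [h0] at hlt
        simp at hlt
      obtain ⟨hfi, hlp⟩ := hfl hne
      obtain ⟨hsum, hlen2⟩ := intervals_telescope A.1 hne
      simp only [PySem.List.len_eq] at hsum hlen2 ⊢
      rw [hfi, hlp, hsum, hlen2,
          show ((A.1.length - 1 : ℕ) : ℤ) = (A.1.length : ℤ) - 1 from by
            have : 2 ≤ A.1.length := by omega
            omega]
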